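-- pv_equiv track=rewrite | github.com/lonkecxd/website-recommend_goods | recommend.py | transformPrefs
-- ===== SOURCE A (Python) =====
-- def transformPrefs(prefs):
--     result = {}
--     for person in prefs:
--         for item in prefs[person]:
--             result.setdefault(item,{})
--             result[item].setdefault(person,0)
--             result[item][person]=prefs[person][item]
--
--     return result
-- ===== SOURCE B (Python) =====
-- def transformPrefs(prefs):
--     # item-outer transpose: precompute item order, then gather each item's column
--     order = {i: None for pp in prefs.values() for i in pp}
--     return {i: {p: pp[i] for p, pp in prefs.items() if i in pp} for i in order}
-- ===== Notes on version B (the rewrite author's own statement) =====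
-- stated objective: alternative
-- what changed: B inverts the loop nesting: it first collects the item keys in first-appearance order, then builds each transposed row with an item-outer/person-inner comprehension, instead of A's person-outer single pass with setdefault mutation.
import Mathlib
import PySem

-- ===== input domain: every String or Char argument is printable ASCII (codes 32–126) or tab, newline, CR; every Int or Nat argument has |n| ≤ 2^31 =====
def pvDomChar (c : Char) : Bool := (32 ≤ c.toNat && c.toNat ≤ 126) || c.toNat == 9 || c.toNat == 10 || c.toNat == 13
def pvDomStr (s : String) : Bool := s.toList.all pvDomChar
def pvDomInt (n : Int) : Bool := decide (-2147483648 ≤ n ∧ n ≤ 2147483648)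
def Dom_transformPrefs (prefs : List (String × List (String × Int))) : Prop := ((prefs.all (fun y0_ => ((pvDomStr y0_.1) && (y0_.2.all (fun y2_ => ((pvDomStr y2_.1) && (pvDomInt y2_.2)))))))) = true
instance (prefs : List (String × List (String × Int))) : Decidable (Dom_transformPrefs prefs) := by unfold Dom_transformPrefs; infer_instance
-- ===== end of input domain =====

-- B transposes item-outer (precomputed item order, then one column per item) instead of A's person-outer setdefault loop; an alternative decomposition, not faster.


-- ===== PORT A =====
def transformPrefs (prefs : List (String × List (String × Int))) : List (String × List (String × Int)) :=
  let pd : PySem.Dict String (List (String × Int)) := PySem.Dict.mk prefs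
  let result : PySem.Dict String (PySem.Dict String Int) :=
    (prefs.map Prod.fst).foldl (fun result person =>
      let pp : PySem.Dict String Int := PySem.Dict.mk (pd.getD person [])   -- prefs[person]
      pp.keys.foldl (fun result item =>
        let r1 := result.setdefault item PySem.Dict.empty                    -- result.setdefault(item,{})
        let inner := (r1.getD item PySem.Dict.empty).setdefault person 0     -- result[item].setdefault(person,0)
        r1.insert item (inner.insert person (pp.getD item 0))                -- result[item][person]=prefs[person][item]
        ) result) PySem.Dict.empty
  result.items.map (fun q => (q.1, q.2.items))

-- ===== PORT B =====
def transformPrefs_alt (prefs : List (String × List (String × Int))) : List (String × List (String × Int)) :=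
  -- order = {i: None for pp in prefs.values() for i in pp}
  let order : PySem.Dict String Unit :=
    prefs.foldl (fun d pr => pr.2.foldl (fun d ip => d.insert ip.1 ()) d) PySem.Dict.empty
  -- {i: {p: pp[i] for p, pp in prefs.items() if i in pp} for i in order}
  order.keys.map (fun i =>
    (i, (prefs.foldl (fun (d : PySem.Dict String Int) pr =>
          let pp : PySem.Dict String Int := PySem.Dict.mk pr.2
          if pp.contains i then d.insert pr.1 (pp.getD i 0) else d) PySem.Dict.empty).items))

-- ===== PRECONDITION & SPEC =====
-- Pre_ excludes association lists with duplicate person keys or duplicate item keys inside a person: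
-- such inputs cannot arise from a Python dict argument, so A never receives them.
def Pre_transformPrefs (prefs : List (String × List (String × Int))) : Prop :=
  (prefs.map Prod.fst).Nodup ∧ ∀ pr ∈ prefs, (pr.2.map Prod.fst).Nodup
instance (prefs : List (String × List (String × Int))) : Decidable (Pre_transformPrefs prefs) := by unfold Pre_transformPrefs; infer_instance
def pvWitness_transformPrefs : (List (String × List (String × Int))) :=
  [("a", [("x", 1), ("y", 2)]), ("b", [("x", 3)])]
def Spec_transformPrefs (prefs : List (String × List (String × Int))) (out : List (String × List (String × Int))) : Prop := out = transformPrefs_alt prefs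
instance (prefs : List (String × List (String × Int))) (out : List (String × List (String × Int))) : Decidable (Spec_transformPrefs prefs out) := by unfold Spec_transformPrefs; infer_instance

-- ===== CLAIM (what is proved, stated in full; the proofs are below) =====
def Claim_equal_transformPrefs : Prop := ∀ (prefs : List (String × List (String × Int))), Dom_transformPrefs prefs → Pre_transformPrefs prefs → Spec_transformPrefs prefs (transformPrefs prefs)

-- ===== LEMMAS AND PROOFS =====

-- canonical form both ports are reduced to
def pvAllItems (prefs : List (String × List (String × Int))) : List String :=
  prefs.flatMap (fun pr => pr.2.map Prod.fst)
def pvPairsFor (i : String) (prefs : List (String × List (String × Int))) : List (String × Int) :=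
  prefs.flatMap (fun pr => (pr.2.filter (fun ip => ip.1 == i)).map (fun ip => (pr.1, ip.2)))
def pvCanon (prefs : List (String × List (String × Int))) : List (String × List (String × Int)) :=
  (PySem.Set.ofList (pvAllItems prefs)).map (fun i => (i, pvPairsFor i prefs))

-- the net effect of A's setdefault/setdefault/assign triple on one (person,item,value)
def pvGstep (p : String) (res : PySem.Dict String (PySem.Dict String Int)) (ip : String × Int) :
    PySem.Dict String (PySem.Dict String Int) :=
  res.insert ip.1 ((res.getD ip.1 PySem.Dict.empty).insert p ip.2)

theorem pvStep_eq (res : PySem.Dict String (PySem.Dict String Int)) (p i : String) (v : Int) :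
    (res.setdefault i PySem.Dict.empty).insert i
      ((((res.setdefault i PySem.Dict.empty).getD i PySem.Dict.empty).setdefault p 0).insert p v)
    = pvGstep p res (i, v) := by
  have h2 : ∀ (w : PySem.Dict String Int), (w.setdefault p 0).insert p v = w.insert p v := by
    intro w
    cases hc : w.contains p
    · rw [PySem.Dict.setdefault_of_not_contains _ _ hc, PySem.Dict.insert_insert_self]
    · rw [PySem.Dict.setdefault_of_contains _ _ hc]
  rw [PySem.Dict.getD_setdefault_self, h2]
  cases hc : res.contains i
  · rw [PySem.Dict.setdefault_of_not_contains _ _ hc, PySem.Dict.insert_insert_self]; rfl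
  · rw [PySem.Dict.setdefault_of_contains _ _ hc]; rfl

-- under the nodup precondition, A's dictionary-lookup loop is the pair loop pvGstep
theorem pvA_eq_G (prefs : List (String × List (String × Int))) (h : Pre_transformPrefs prefs) :
    transformPrefs prefs =
      (prefs.foldl (fun res pr => pr.2.foldl (pvGstep pr.1) res) PySem.Dict.empty).items.map
        (fun q => (q.1, q.2.items)) := by
  obtain ⟨h1, h2⟩ := h
  unfold transformPrefs
  dsimp only
  rw [List.foldl_map]
  refine congrArg (fun d : PySem.Dict String (PySem.Dict String Int) =>
    d.items.map (fun q => (q.1, q.2.items))) ?_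
  apply PySem.List.foldl_congr_mem
  intro res pr hpr
  have hval : (PySem.Dict.mk prefs).getD pr.1 [] = pr.2 :=
    PySem.Dict.getD_of_mem_items _ hpr h1 []
  rw [hval]
  rw [show (PySem.Dict.mk pr.2).keys = pr.2.map Prod.fst from rfl, List.foldl_map]
  apply PySem.List.foldl_congr_mem
  intro res' ip hip
  have hnd : (PySem.Dict.mk pr.2).keys.Nodup := h2 pr hpr
  have hv : (PySem.Dict.mk pr.2).getD ip.1 0 = ip.2 :=
    PySem.Dict.getD_of_mem_items _ hip hnd 0
  simp only [hv]
  exact pvStep_eq res' pr.1 ip.1 ip.2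

theorem pvG_keys (prefs : List (String × List (String × Int)))
    (res : PySem.Dict String (PySem.Dict String Int)) :
    (prefs.foldl (fun res pr => pr.2.foldl (pvGstep pr.1) res) res).keys
      = PySem.Set.update res.keys (pvAllItems prefs) := by
  induction prefs generalizing res with
  | nil => simp [pvAllItems]
  | cons pr rest ih =>
    rw [List.foldl_cons, ih]
    have : (pr.2.foldl (pvGstep pr.1) res).keys = PySem.Set.update res.keys (pr.2.map Prod.fst) :=
      PySem.Dict.keys_foldl_insert_key pr.2 Prod.fst
        (fun d ip => (d.getD ip.1 PySem.Dict.empty).insert pr.1 ip.2) res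
    rw [this, ← PySem.Set.update_append]
    simp [pvAllItems]

-- with nodup item keys, the filter at one item has at most one hit
theorem pvFilt (pp : List (String × Int)) (i : String) (h : (pp.map Prod.fst).Nodup) :
    pp.filter (fun ip => ip.1 == i) = [] ∨ ∃ v, pp.filter (fun ip => ip.1 == i) = [(i, v)] := by
  induction pp with
  | nil => exact Or.inl rfl
  | cons ip tl ih =>
    obtain ⟨a, b⟩ := ip
    simp only [List.map_cons, List.nodup_cons] at h
    by_cases hip : a = i
    · subst hip
      right
      refine ⟨b, ?_⟩
      have htl : tl.filter (fun q => q.1 == a) = [] := by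
        rw [List.filter_eq_nil_iff]
        intro q hq hqeq
        exact h.1 (beq_iff_eq.mp hqeq ▸ List.mem_map_of_mem hq)
      simp [htl]
    · have hb : (a == i) = false := beq_eq_false_iff_ne.mpr hip
      simp only [List.filter_cons, hb, if_neg Bool.false_ne_true]
      exact ih h.2

theorem pvG_getD_inner (pp : List (String × Int)) (p i : String)
    (res : PySem.Dict String (PySem.Dict String Int)) :
    (pp.foldl (pvGstep p) res).getD i PySem.Dict.empty
      = (pp.filter (fun ip => ip.1 == i)).foldl (fun w ip => w.insert p ip.2)
          (res.getD i PySem.Dict.empty) := by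
  induction pp generalizing res with
  | nil => rfl
  | cons ip tl ih =>
    rw [List.foldl_cons, ih, List.filter_cons]
    by_cases hip : ip.1 = i
    · simp [hip, pvGstep]
    · have hb : (ip.1 == i) = false := beq_eq_false_iff_ne.mpr hip
      simp [hb, pvGstep, PySem.Dict.getD_insert, Ne.symm hip]

theorem pvG_main (prefs : List (String × List (String × Int)))
    (res : PySem.Dict String (PySem.Dict String Int))
    (h1 : (prefs.map Prod.fst).Nodup)
    (h2 : ∀ pr ∈ prefs, (pr.2.map Prod.fst).Nodup)
    (hfresh : ∀ i p, p ∈ prefs.map Prod.fst → (res.getD i PySem.Dict.empty).contains p = false) :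
    ∀ i, ((prefs.foldl (fun res pr => pr.2.foldl (pvGstep pr.1) res) res).getD i
            PySem.Dict.empty).items
          = (res.getD i PySem.Dict.empty).items ++ pvPairsFor i prefs := by
  induction prefs generalizing res with
  | nil => intro i; simp [pvPairsFor]
  | cons pr rest ih =>
    intro i
    simp only [List.map_cons, List.nodup_cons] at h1
    have hstep : ∀ j, ((pr.2.foldl (pvGstep pr.1) res).getD j PySem.Dict.empty).items
        = (res.getD j PySem.Dict.empty).items
          ++ (pr.2.filter (fun ip => ip.1 == j)).map (fun ip => (pr.1, ip.2)) := by
      intro j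
      rw [pvG_getD_inner]
      rcases pvFilt pr.2 j (h2 pr (List.mem_cons_self)) with hf | ⟨v, hf⟩
      · simp [hf]
      · rw [hf]
        simp only [List.foldl_cons, List.foldl_nil, List.map_cons, List.map_nil]
        exact PySem.Dict.items_insert_of_not_contains _ _
          (hfresh j pr.1 (List.mem_cons_self))
    have hstepc : ∀ j q, q ≠ pr.1 →
        ((pr.2.foldl (pvGstep pr.1) res).getD j PySem.Dict.empty).contains q
          = (res.getD j PySem.Dict.empty).contains q := by
      intro j q hq
      rw [pvG_getD_inner]
      rcases pvFilt pr.2 j (h2 pr (List.mem_cons_self)) with hf | ⟨v, hf⟩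
      · rw [hf]; rfl
      · rw [hf]
        simp only [List.foldl_cons, List.foldl_nil]
        rw [PySem.Dict.contains_insert]
        simp [hq]

    rw [List.foldl_cons,
        ih _ h1.2 (fun q hq => h2 q (List.mem_cons_of_mem _ hq))
          (fun j q hq => by
            rw [hstepc j q (by rintro rfl; exact h1.1 hq)]
            exact hfresh j q (List.mem_cons_of_mem _ hq)),
        hstep i]
    simp [pvPairsFor, List.append_assoc]

theorem pvA_eq_canon (prefs : List (String × List (String × Int)))
    (h : Pre_transformPrefs prefs) : transformPrefs prefs = pvCanon prefs := by
  rw [pvA_eq_G prefs h]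
  obtain ⟨h1, h2⟩ := h
  have hkeys : (prefs.foldl (fun res pr => pr.2.foldl (pvGstep pr.1) res)
      PySem.Dict.empty).keys = PySem.Set.ofList (pvAllItems prefs) := by
    rw [pvG_keys]
    exact PySem.Set.update_nil_left _
  have hnd : (prefs.foldl (fun res pr => pr.2.foldl (pvGstep pr.1) res)
      PySem.Dict.empty).keys.Nodup := by
    rw [hkeys]; exact PySem.Set.nodup_ofList _
  rw [PySem.Dict.items_eq_map_keys _ hnd PySem.Dict.empty, hkeys, List.map_map]
  unfold pvCanon
  apply List.map_congr_left
  intro i _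
  simp only [Function.comp]
  rw [pvG_main prefs PySem.Dict.empty h1 h2
      (fun j p _ => by rw [PySem.Dict.getD_empty]; exact PySem.Dict.contains_empty p) i]
  simp [PySem.Dict.getD_empty,
    show (PySem.Dict.empty : PySem.Dict String Int).items = [] from rfl]

-- ===== B side =====

theorem pvB_keys (prefs : List (String × List (String × Int))) (d : PySem.Dict String Unit) :
    (prefs.foldl (fun d pr => pr.2.foldl (fun d ip => d.insert ip.1 ()) d) d).keys
      = PySem.Set.update d.keys (pvAllItems prefs) := by
  induction prefs generalizing d with
  | nil => simp [pvAllItems]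
  | cons pr rest ih =>
    rw [List.foldl_cons, ih]
    have : (pr.2.foldl (fun d ip => d.insert ip.1 ()) d).keys
        = PySem.Set.update d.keys (pr.2.map Prod.fst) :=
      PySem.Dict.keys_foldl_insert_key pr.2 Prod.fst (fun _ _ => ()) d
    rw [this, ← PySem.Set.update_append]
    simp [pvAllItems]

theorem pvB_inner (i : String) (prefs : List (String × List (String × Int)))
    (d : PySem.Dict String Int)
    (h1 : (prefs.map Prod.fst).Nodup)
    (h2 : ∀ pr ∈ prefs, (pr.2.map Prod.fst).Nodup)
    (hfresh : ∀ p, p ∈ prefs.map Prod.fst → d.contains p = false) :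
    (prefs.foldl (fun d pr =>
        if (PySem.Dict.mk pr.2).contains i then d.insert pr.1 ((PySem.Dict.mk pr.2).getD i 0)
        else d) d).items
      = d.items ++ pvPairsFor i prefs := by
  induction prefs generalizing d with
  | nil => simp [pvPairsFor]
  | cons pr rest ih =>
    simp only [List.map_cons, List.nodup_cons] at h1
    rw [List.foldl_cons]
    by_cases hc : (PySem.Dict.mk pr.2).contains i = true
    · have hmem : i ∈ pr.2.map Prod.fst := by
        have := PySem.Dict.contains_eq_decide_mem_keys (PySem.Dict.mk pr.2) i
        rw [hc] at this
        exact of_decide_eq_true this.symm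
      rcases pvFilt pr.2 i (h2 pr (List.mem_cons_self)) with hf | ⟨v, hf⟩
      · exfalso
        obtain ⟨ip, hip, hipeq⟩ := List.mem_map.mp hmem
        have : ip ∈ pr.2.filter (fun q => q.1 == i) :=
          List.mem_filter.mpr ⟨hip, beq_iff_eq.mpr hipeq⟩
        simp [hf] at this
      · have hvmem : (i, v) ∈ pr.2 := by
          have : (i, v) ∈ pr.2.filter (fun q => q.1 == i) := by rw [hf]; exact List.mem_cons_self
          exact List.mem_of_mem_filter this
        have hnd : (PySem.Dict.mk pr.2).keys.Nodup := h2 pr (List.mem_cons_self)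
        have hv : (PySem.Dict.mk pr.2).getD i 0 = v :=
          PySem.Dict.getD_of_mem_items _ hvmem hnd 0
        rw [if_pos hc, hv,
            ih (d.insert pr.1 v) h1.2 (fun q hq => h2 q (List.mem_cons_of_mem _ hq))
              (fun q hq => by
                rw [PySem.Dict.contains_insert]
                have : q ≠ pr.1 := by rintro rfl; exact h1.1 hq
                simp [this, hfresh q (List.mem_cons_of_mem _ hq)]),
            PySem.Dict.items_insert_of_not_contains _ _ (hfresh pr.1 (List.mem_cons_self))]
        simp [pvPairsFor, hf, List.append_assoc]
    · have hnmem : i ∉ pr.2.map Prod.fst := by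
        have := PySem.Dict.contains_eq_decide_mem_keys (PySem.Dict.mk pr.2) i
        rw [Bool.not_eq_true] at hc
        rw [hc] at this
        exact of_decide_eq_false this.symm
      have hf : pr.2.filter (fun q => q.1 == i) = [] := by
        rw [List.filter_eq_nil_iff]
        intro q hq hqeq
        exact hnmem (beq_iff_eq.mp hqeq ▸ List.mem_map_of_mem hq)
      rw [if_neg hc, ih d h1.2 (fun q hq => h2 q (List.mem_cons_of_mem _ hq))
            (fun q hq => hfresh q (List.mem_cons_of_mem _ hq))]
      simp [pvPairsFor, hf]

theorem pvB_eq_canon (prefs : List (String × List (String × Int)))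
    (h : Pre_transformPrefs prefs) : transformPrefs_alt prefs = pvCanon prefs := by
  obtain ⟨h1, h2⟩ := h
  unfold transformPrefs_alt
  dsimp only
  have hkeys : (prefs.foldl (fun d pr => pr.2.foldl (fun d ip => d.insert ip.1 ()) d)
      PySem.Dict.empty).keys = PySem.Set.ofList (pvAllItems prefs) := by
    rw [pvB_keys]
    exact PySem.Set.update_nil_left _
  rw [hkeys]
  unfold pvCanon
  apply List.map_congr_left
  intro i _
  congr 1
  rw [pvB_inner i prefs PySem.Dict.empty h1 h2 (fun p _ => PySem.Dict.contains_empty p)]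
  rfl

-- ===== VERDICT (by name: the statement is the Claim_ definition above) =====
theorem transformPrefs_spec : Claim_equal_transformPrefs := by
  intro prefs _ hpre
  unfold Spec_transformPrefs
  rw [pvA_eq_canon prefs hpre, pvB_eq_canon prefs hpre]
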